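-- pv_equiv track=rewrite | github.com/Uscera-Liberty/chislaki_2.0 | python_course/lab1.py | zadacha47
-- ===== SOURCE A (Python) =====
-- def zadacha47(l):
--     res = []
--     for x in l:
--         for d in range(1, x+1):
--             if x%d == 0:
--                 if d not in res:
--                     res.append(d)
--     return res
-- ===== SOURCE B (Python) =====
-- def zadacha47(l):
--     res = []
--     seen = set()
--     for x in l:
--         divs = set()
--         d = 1
--         while d * d <= x:
--             if x % d == 0:
--                 divs.add(d)
--                 divs.add(x // d)
--             d += 1
--         for d in sorted(divs):
--             if d not in seen:
--                 seen.add(d)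
--                 res.append(d)
--     return res
-- ===== Notes on version B (the rewrite author's own statement) =====
-- stated objective: faster
-- what changed: B enumerates each x's divisors only up to sqrt(x) in pairs (d, x//d), sorts them, and deduplicates through a hash set instead of scanning the whole result list for membership at every candidate d in 1..x.
import Mathlib
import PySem

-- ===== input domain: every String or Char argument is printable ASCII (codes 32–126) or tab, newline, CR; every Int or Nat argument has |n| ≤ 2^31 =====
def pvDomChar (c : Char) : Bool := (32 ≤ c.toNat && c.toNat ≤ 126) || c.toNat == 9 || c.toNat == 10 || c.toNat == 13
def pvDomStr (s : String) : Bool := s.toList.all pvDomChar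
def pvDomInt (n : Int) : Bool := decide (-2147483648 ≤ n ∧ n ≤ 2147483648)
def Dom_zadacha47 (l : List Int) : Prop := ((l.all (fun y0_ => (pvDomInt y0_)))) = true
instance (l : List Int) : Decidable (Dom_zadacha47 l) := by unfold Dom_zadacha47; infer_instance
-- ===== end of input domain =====

-- B is a faster re-implementation: per-element sqrt divisor enumeration into a set, sorted,
-- with a global seen-set for dedup, instead of A's trial division up to x with a list scan per candidate.

-- ===== PORT A =====
-- for x in l: for d in range(1, x+1): if x%d==0 and d not in res: res.append(d)
def zadacha47 (l : List Int) : List Int :=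
  l.foldl (fun res x =>
    (PySem.List.pyRange 1 (x + 1) 1).foldl (fun res d =>
      if PySem.Int.mod x d == 0 then
        (if res.contains d then res else res ++ [d])
      else res) res) []

-- ===== PORT B =====
-- while d*d <= x: if x%d==0: divs.add(d); divs.add(x//d); d += 1
def zadacha47AltDivs (x : Int) (d : Nat) (divs : PySem.Set Int) : PySem.Set Int :=
  if (d : Int) * (d : Int) ≤ x then
    zadacha47AltDivs x (d + 1)
      (if PySem.Int.mod x (d : Int) == 0 then
        (divs.add (d : Int)).add (PySem.Int.floordiv x (d : Int))
      else divs)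
  else divs
termination_by x.toNat + 1 - d
decreasing_by
  rename_i h
  have _hdd : ((d * d : Nat) : Int) ≤ x := by push_cast; linarith
  have h2 : d ≤ d * d := by nlinarith
  omega

-- for x in l: for d in sorted(divs): if d not in seen: seen.add(d); res.append(d)
def zadacha47_alt (l : List Int) : List Int :=
  (l.foldl (fun (st : PySem.Set Int × List Int) x =>
      (PySem.List.sorted (zadacha47AltDivs x 1 PySem.Set.empty) (fun y => y) false).foldl
        (fun (st : PySem.Set Int × List Int) d =>
          if st.1.contains d then st else (st.1.add d, st.2 ++ [d])) st)
    (PySem.Set.empty, [])).2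

-- ===== PRECONDITION & SPEC =====
def Spec_zadacha47 (l : List Int) (out : List Int) : Prop := out = zadacha47_alt l
instance (l : List Int) (out : List Int) : Decidable (Spec_zadacha47 l out) := by unfold Spec_zadacha47; infer_instance

-- ===== CLAIM (what is proved, stated in full; the proofs are below) =====
def Claim_equal_zadacha47 : Prop := ∀ (l : List Int), Dom_zadacha47 l → Spec_zadacha47 l (zadacha47 l)

-- ===== LEMMAS AND PROOFS =====

theorem pvDivloop_mem (x : Int) (k : Nat) (s : PySem.Set Int) (a : Int) :
    a ∈ zadacha47AltDivs x k s ↔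
      a ∈ s ∨ ∃ e : Nat, k ≤ e ∧ (e : Int) * (e : Int) ≤ x ∧
        PySem.Int.mod x (e : Int) = 0 ∧ (a = (e : Int) ∨ a = PySem.Int.floordiv x (e : Int)) := by
  fun_induction zadacha47AltDivs x k s with
  | case1 k s hcond ih =>
    simp only [dite_eq_ite] at ih
    rw [ih]
    by_cases hm : PySem.Int.mod x (k : Int) = 0
    · simp only [hm, beq_self_eq_true, if_true, PySem.Set.mem_add]
      constructor
      · rintro (((hs | hk) | hq) | ⟨e, he1, he2, he3, he4⟩)
        · exact Or.inl hs
        · exact Or.inr ⟨k, le_refl _, hcond, hm, Or.inl hk⟩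
        · exact Or.inr ⟨k, le_refl _, hcond, hm, Or.inr hq⟩
        · exact Or.inr ⟨e, by omega, he2, he3, he4⟩
      · rintro (hs | ⟨e, he1, he2, he3, he4⟩)
        · exact Or.inl (Or.inl (Or.inl hs))
        · by_cases hek : e = k
          · subst hek
            rcases he4 with h4 | h4
            · exact Or.inl (Or.inl (Or.inr h4))
            · exact Or.inl (Or.inr h4)
          · exact Or.inr ⟨e, by omega, he2, he3, he4⟩
    · rw [if_neg (show ¬((PySem.Int.mod x (k:Int) == 0) = true) by simpa using hm)]
      constructor
      · rintro (hs | ⟨e, he1, he2, he3, he4⟩)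
        · exact Or.inl hs
        · exact Or.inr ⟨e, by omega, he2, he3, he4⟩
      · rintro (hs | ⟨e, he1, he2, he3, he4⟩)
        · exact Or.inl hs
        · by_cases hek : e = k
          · subst hek; exact absurd he3 hm
          · exact Or.inr ⟨e, by omega, he2, he3, he4⟩
  | case2 k s hcond =>
    constructor
    · exact Or.inl
    · rintro (hs | ⟨e, he1, he2, he3, he4⟩)
      · exact hs
      · exfalso
        apply hcond
        have : (k:Int) * k ≤ (e:Int) * e := by
          exact_mod_cast Nat.mul_le_mul he1 he1
        linarith

theorem pvDivloop_nodup (x : Int) (k : Nat) (s : PySem.Set Int) (hs : s.Nodup) :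
    (zadacha47AltDivs x k s).Nodup := by
  fun_induction zadacha47AltDivs x k s with
  | case1 k s hcond ih =>
    apply ih
    split
    · exact PySem.Set.nodup_add _ _ (PySem.Set.nodup_add _ _ hs)
    · exact hs
  | case2 k s hcond => exact hs

theorem pvDivloop_one_mem (x : Int) (a : Int) :
    a ∈ zadacha47AltDivs x 1 PySem.Set.empty ↔ 1 ≤ a ∧ a ≤ x ∧ PySem.Int.mod x a = 0 := by
  rw [pvDivloop_mem]
  simp only [PySem.Set.empty, List.not_mem_nil, false_or]
  constructor
  · rintro ⟨e, he1, he2, he3, he4⟩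
    have he0 : (1:Int) ≤ (e:Int) := by exact_mod_cast he1
    have hex : (e:Int) ≤ x := by nlinarith
    rcases he4 with rfl | rfl
    · exact ⟨he0, hex, he3⟩
    · have hdvd : (e:Int) ∣ x := (PySem.Int.mod_eq_zero_iff_dvd x e).mp he3
      obtain ⟨w, hw⟩ := hdvd
      have hfd : PySem.Int.floordiv x (e:Int) = w := by
        rw [PySem.Int.floordiv_eq_ediv_of_pos (by omega), hw, Int.mul_ediv_cancel_left w (by omega)]
      rw [hfd]
      refine ⟨?_, ?_, ?_⟩
      · nlinarith
      · nlinarith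
      · rw [PySem.Int.mod_eq_zero_iff_dvd]
        exact ⟨(e:Int), by linarith [hw]⟩
  · rintro ⟨ha1, hax, ham⟩
    have hdvd : a ∣ x := (PySem.Int.mod_eq_zero_iff_dvd x a).mp ham
    obtain ⟨w, hw⟩ := hdvd
    have hw1 : 1 ≤ w := by nlinarith
    by_cases hsq : a * a ≤ x
    · refine ⟨a.toNat, by omega, ?_, ?_, Or.inl (by omega)⟩
      · push_cast [Int.toNat_of_nonneg (by omega : (0:Int) ≤ a)]; exact hsq
      · rw [Int.toNat_of_nonneg (by omega : (0:Int) ≤ a)]; exact ham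
    · refine ⟨w.toNat, by omega, ?_, ?_, Or.inr ?_⟩
      · rw [Int.toNat_of_nonneg (by omega : (0:Int) ≤ w)]
        nlinarith
      · rw [Int.toNat_of_nonneg (by omega : (0:Int) ≤ w), PySem.Int.mod_eq_zero_iff_dvd]
        exact ⟨a, by linarith [hw]⟩
      · rw [Int.toNat_of_nonneg (by omega : (0:Int) ≤ w)]
        rw [PySem.Int.floordiv_eq_ediv_of_pos (by omega), hw, Int.mul_ediv_cancel a (by omega)]
def pvDA (x : Int) : List Int :=
  (PySem.List.pyRange 1 (x + 1) 1).filter (fun d => PySem.Int.mod x d == 0)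

theorem pvSorted_divs (x : Int) :
    PySem.List.sorted (zadacha47AltDivs x 1 PySem.Set.empty) (fun y => y) false = pvDA x := by
  apply PySem.List.sorted_eq_of_perm_of_pairwise_lt
  · apply (List.perm_ext_iff_of_nodup ?_ ?_).mpr
    · intro a
      rw [pvDivloop_one_mem]
      simp only [pvDA, List.mem_filter, PySem.List.mem_pyRange_one, beq_iff_eq]
      omega
    · exact (PySem.List.nodup_pyRange_one 1 (x+1)).filter _
    · exact pvDivloop_nodup x 1 _ List.nodup_nil
  · exact (PySem.List.pairwise_lt_pyRange_one 1 (x+1)).sublist List.filter_sublist  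
theorem pvInner (ds : List Int) (s : PySem.Set Int) (res : List Int)
    (h : ∀ a, a ∈ s ↔ a ∈ res) :
    (ds.foldl (fun (st : PySem.Set Int × List Int) d =>
        if st.1.contains d then st else (st.1.add d, st.2 ++ [d])) (s, res)).2
      = ds.foldl (fun res d => if res.contains d then res else res ++ [d]) res ∧
    (∀ a, a ∈ (ds.foldl (fun (st : PySem.Set Int × List Int) d =>
        if st.1.contains d then st else (st.1.add d, st.2 ++ [d])) (s, res)).1 ↔
      a ∈ ds.foldl (fun res d => if res.contains d then res else res ++ [d]) res) := by
  induction ds generalizing s res with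
  | nil => exact ⟨rfl, h⟩
  | cons d ds ih =>
    simp only [List.foldl_cons]
    have hc : s.contains d = res.contains d := by
      simp only [List.contains_eq_mem]
      simp [h d]
    by_cases hd : res.contains d
    · rw [if_pos (by rw [hc]; exact hd), if_pos hd]
      exact ih s res h
    · rw [if_neg (by rw [hc]; exact hd), if_neg hd]
      apply ih
      intro a
      rw [PySem.Set.mem_add, h a, List.mem_append, List.mem_singleton]
theorem pvOuter (l : List Int) (s : PySem.Set Int) (res : List Int)
    (h : ∀ a, a ∈ s ↔ a ∈ res) :
    (l.foldl (fun (st : PySem.Set Int × List Int) x =>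
        (PySem.List.sorted (zadacha47AltDivs x 1 PySem.Set.empty) (fun y => y) false).foldl
          (fun (st : PySem.Set Int × List Int) d =>
            if st.1.contains d then st else (st.1.add d, st.2 ++ [d])) st) (s, res)).2
      = l.foldl (fun res x =>
          (PySem.List.pyRange 1 (x + 1) 1).foldl (fun res d =>
            if PySem.Int.mod x d == 0 then
              (if res.contains d then res else res ++ [d])
            else res) res) res := by
  induction l generalizing s res with
  | nil => rfl
  | cons x l ih =>
    simp only [List.foldl_cons]
    have hfil : ∀ (init : List Int),
        List.foldl (fun res d =>
          if PySem.Int.mod x d == 0 then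
            (if res.contains d then res else res ++ [d]) else res) init
          (PySem.List.pyRange 1 (x + 1) 1)
        = List.foldl (fun res d => if res.contains d then res else res ++ [d]) init (pvDA x) := by
      intro init
      rw [pvDA, List.foldl_filter]
    rw [pvSorted_divs, hfil]
    obtain ⟨h1, h2⟩ := pvInner (pvDA x) s res h
    rw [show ((pvDA x).foldl (fun (st : PySem.Set Int × List Int) d =>
          if st.1.contains d then st else (st.1.add d, st.2 ++ [d])) (s, res))
        = (((pvDA x).foldl (fun (st : PySem.Set Int × List Int) d =>
          if st.1.contains d then st else (st.1.add d, st.2 ++ [d])) (s, res)).1,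
           (pvDA x).foldl (fun res d => if res.contains d then res else res ++ [d]) res) from
      by rw [← h1]]
    exact ih _ _ h2

-- ===== VERDICT (by name: the statement is the Claim_ definition above) =====
theorem zadacha47_spec : Claim_equal_zadacha47 := by
  intro l _
  unfold Spec_zadacha47 zadacha47 zadacha47_alt
  exact (pvOuter l PySem.Set.empty [] (by simp [PySem.Set.empty])).symm
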